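-- pv_equiv track=rewrite | github.com/Aphoh/torchtitan | torchtitan/simulate.py | generate_parallelism_configs
-- ===== SOURCE A (Python) =====
-- from collections import Counter
-- from math import prod
-- from typing import List, Iterator, Tuple
-- from typing import Dict, Optional
--
-- def prime_factorize(n: int) -> List[int]:
--     """
--     Compute the prime factorization of a number.
--
--     Args:
--         n: The number to factorize
--
--     Returns:
--         List of prime factors
--     """
--     factors = []
--     d = 2
--     while n > 1:
--         while n % d == 0:
--             factors.append(d)
--             n //= d
--         d += 1
--         if d * d > n and n > 1:
--             factors.append(n)
--             break
--     return factors
--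
-- def lists_from_primes_gen(nums: List[int], d: int) -> Iterator[List[int]]:
--     """
--     Yield, without duplicates, every length‑d list whose ordered
--     elements are products of disjoint subsets of `nums`.
--     Empty subsets are allowed (slot = 1).
--     """
--     if d <= 0:
--         raise ValueError("d must be positive")
--
--     primes = list(Counter(nums).items())  # (prime, multiplicity)
--     out = [1] * d  # current partial result
--
--     def dfs(i: int):
--         if i == len(primes):  # all primes placed
--             yield out.copy()
--             return
--
--         p, c = primes[i]  # distribute c copies of p
--         comp = [0] * d  # composition of c into d parts
--
--         def comp_rec(pos: int, remaining: int):
--             if pos == d - 1:  # last slot gets the rest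
--                 comp[pos] = remaining
--                 for k in range(d):  # apply
--                     if comp[k]:
--                         out[k] *= p ** comp[k]
--                 yield from dfs(i + 1)
--                 for k in range(d):  # back‑track
--                     if comp[k]:
--                         out[k] //= p ** comp[k]
--                 return
--
--             for cnt in range(remaining + 1):
--                 comp[pos] = cnt
--                 yield from comp_rec(pos + 1, remaining - cnt)
--
--         yield from comp_rec(0, c)
--
--     yield from dfs(0)
--
-- def generate_parallelism_configs(world_size: int) -> Iterator[Dict[str, int]]:
--     fixed = {
--         "dp_replicate": 1,
--         "pp": 1,
--     }
--
--     search = ["dp_shard", "tp", "cp"]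
--     primes = prime_factorize(world_size)
--     for assigsn in lists_from_primes_gen(primes, len(search)):
--         config = {**fixed, **dict(zip(search, assigsn))}
--         # Ensure that the product of all degrees equals world_size
--         assert prod(config.values()) == world_size
--         yield config
-- ===== SOURCE B (Python) =====
-- from collections import Counter
-- from itertools import product
--
-- def prime_factorize(n):
--     factors = []
--     d = 2
--     while n > 1:
--         while n % d == 0:
--             factors.append(d)
--             n //= d
--         d += 1
--         if d * d > n and n > 1:
--             factors.append(n)
--             break
--     return factors
--
-- def generate_parallelism_configs(world_size):
--     # one list of candidate (dp_shard, tp, cp) prime-power triples per distinct prime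
--     choice_lists = []
--     for p, c in Counter(prime_factorize(world_size)).items():
--         choice_lists.append([(p ** c0, p ** c1, p ** (c - c0 - c1))
--                              for c0 in range(c + 1) for c1 in range(c - c0 + 1)])
--     for combo in product(*choice_lists):
--         dp_shard = tp = cp = 1
--         for (x, y, z) in combo:
--             dp_shard *= x
--             tp *= y
--             cp *= z
--         yield {"dp_replicate": 1, "pp": 1, "dp_shard": dp_shard, "tp": tp, "cp": cp}
-- ===== Notes on version B (the rewrite author's own statement) =====
-- stated objective: alternative
-- what changed: A's recursive generator DFS with in-place comp/out mutation and backtracking is replaced by building, per distinct prime, the list of exponent-composition triples (p**c0, p**c1, p**c2) and combining them with itertools.product, multiplying componentwise.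
import Mathlib
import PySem

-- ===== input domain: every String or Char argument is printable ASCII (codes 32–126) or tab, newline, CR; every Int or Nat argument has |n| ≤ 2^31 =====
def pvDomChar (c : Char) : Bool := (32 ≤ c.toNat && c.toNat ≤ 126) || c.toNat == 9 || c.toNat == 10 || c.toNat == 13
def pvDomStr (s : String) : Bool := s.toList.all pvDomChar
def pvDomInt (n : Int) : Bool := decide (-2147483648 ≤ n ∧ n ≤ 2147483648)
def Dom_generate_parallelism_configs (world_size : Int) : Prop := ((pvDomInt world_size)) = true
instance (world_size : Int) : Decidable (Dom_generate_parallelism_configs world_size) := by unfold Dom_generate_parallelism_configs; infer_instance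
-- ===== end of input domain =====

-- B replaces A's recursive generator DFS with in-place mutation/backtracking by per-prime
-- lists of exponent-composition triples combined with an itertools.product-style cartesian
-- product (objective: alternative decomposition, same cost). The Python functions are
-- generators; the return value compared is the list of yielded dicts.

-- ===== PORT A =====

-- inner `while n % d == 0` loop of A's prime_factorize
def pvPfInnerA (fuel : Nat) (n d : Int) (acc : List Int) : Int × List Int :=
  match fuel with
  | 0 => (n, acc)
  | f + 1 =>
    if PySem.Int.mod n d = 0 then pvPfInnerA f (PySem.Int.floordiv n d) d (acc ++ [d])
    else (n, acc)

-- outer `while n > 1` loop (fuel bounds the iteration count: d increments every round)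
def pvPfOuterA (fuel : Nat) (n d : Int) (acc : List Int) : List Int :=
  match fuel with
  | 0 => acc
  | f + 1 =>
    if n > 1 then
      let r := pvPfInnerA (n.toNat + 1) n d acc
      let d' := d + 1
      if d' * d' > r.1 ∧ r.1 > 1 then r.2 ++ [r.1]
      else pvPfOuterA f r.1 d' r.2
    else acc

def prime_factorize_A (n : Int) : List Int := pvPfOuterA (n.toNat + 1) n 2 []

-- A's dfs / comp_rec: the mutated arrays `comp` and `out` become passed values
-- (`compPrefix` is the part of `comp` set so far; backtracking on `out` is implicit).
mutual
def pvDfsA (d : Nat) : List (Int × Int) → List Int → List (List Int)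
  | [], out => [out]
  | (p, c) :: rest, out => pvCompRecA d p rest (d - 1) c [] out
termination_by ps _ => (ps.length, 0, 0)
-- k = (d - 1) - pos, the number of slots before the last one still to fill
def pvCompRecA (d : Nat) (p : Int) (rest : List (Int × Int)) (k : Nat) (remaining : Int)
    (compPrefix : List Int) (out : List Int) : List (List Int) :=
  match k with
  | 0 =>
      let comp := compPrefix ++ [remaining]
      let out' := (List.range d).foldl
        (fun o j => if comp.getD j 0 ≠ 0 then o.set j (o.getD j 0 * p ^ (comp.getD j 0).toNat) else o) out
      pvDfsA d rest out'
  | k' + 1 =>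
      (PySem.List.pyRange 0 (remaining + 1) 1).flatMap fun cnt =>
        pvCompRecA d p rest k' (remaining - cnt) (compPrefix ++ [cnt]) out
termination_by (rest.length, 1, k)
end

-- lists_from_primes_gen(nums, d); the `raise ValueError` branch (d ≤ 0) is unreachable at the
-- only call site (d = 3), ported as returning no yields
def lists_from_primes_gen_A (nums : List Int) (d : Int) : List (List Int) :=
  if d ≤ 0 then []
  else
    let primes := (PySem.Dict.counter nums).items
    pvDfsA d.toNat primes (List.replicate d.toNat 1)

-- the `assert prod(...) == world_size` raises AssertionError for world_size ≤ 0: excluded by Pre_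
def generate_parallelism_configs (world_size : Int) : List (List (String × Int)) :=
  let fixed : List (String × Int) := [("dp_replicate", 1), ("pp", 1)]
  let search : List String := ["dp_shard", "tp", "cp"]
  let primes := prime_factorize_A world_size
  (lists_from_primes_gen_A primes (search.length : Int)).map fun assigsn =>
    fixed ++ search.zip assigsn   -- {**fixed, **dict(zip(search, assigsn))}: disjoint keys

-- ===== PORT B =====

def pvPfInnerB (fuel : Nat) (n d : Int) (acc : List Int) : Int × List Int :=
  match fuel with
  | 0 => (n, acc)
  | f + 1 =>
    if PySem.Int.mod n d = 0 then pvPfInnerB f (PySem.Int.floordiv n d) d (acc ++ [d])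
    else (n, acc)

def pvPfOuterB (fuel : Nat) (n d : Int) (acc : List Int) : List Int :=
  match fuel with
  | 0 => acc
  | f + 1 =>
    if n > 1 then
      let r := pvPfInnerB (n.toNat + 1) n d acc
      let d' := d + 1
      if d' * d' > r.1 ∧ r.1 > 1 then r.2 ++ [r.1]
      else pvPfOuterB f r.1 d' r.2
    else acc

def prime_factorize_B (n : Int) : List Int := pvPfOuterB (n.toNat + 1) n 2 []

-- [(p**c0, p**c1, p**(c-c0-c1)) for c0 in range(c+1) for c1 in range(c-c0+1)]
def pvTriplesB (p c : Int) : List (Int × Int × Int) :=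
  (PySem.List.pyRange 0 (c + 1) 1).flatMap fun c0 =>
    (PySem.List.pyRange 0 (c - c0 + 1) 1).map fun c1 =>
      (p ^ c0.toNat, p ^ c1.toNat, p ^ (c - c0 - c1).toNat)

-- itertools.product(*lists): first list outermost (row-major order)
def pvProductB : List (List (Int × Int × Int)) → List (List (Int × Int × Int))
  | [] => [[]]
  | l :: ls => l.flatMap fun x => (pvProductB ls).map (x :: ·)

def generate_parallelism_configs_alt (world_size : Int) : List (List (String × Int)) :=
  let choiceLists := ((PySem.Dict.counter (prime_factorize_B world_size)).items).map
    fun pc => pvTriplesB pc.1 pc.2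
  (pvProductB choiceLists).map fun combo =>
    let m := combo.foldl (fun acc t => (acc.1 * t.1, acc.2.1 * t.2.1, acc.2.2 * t.2.2)) (1, 1, 1)
    [("dp_replicate", 1), ("pp", 1), ("dp_shard", m.1), ("tp", m.2.1), ("cp", m.2.2)]

-- ===== PRECONDITION & SPEC =====
-- Pre_ excludes world_size ≤ 0, where A's `assert prod(config.values()) == world_size` raises AssertionError.
def Pre_generate_parallelism_configs (world_size : Int) : Prop := 0 < world_size
instance (world_size : Int) : Decidable (Pre_generate_parallelism_configs world_size) := by
  unfold Pre_generate_parallelism_configs; infer_instance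
def pvWitness_generate_parallelism_configs : Int := (12)

def Spec_generate_parallelism_configs (world_size : Int) (out : List (List (String × Int))) : Prop := out = generate_parallelism_configs_alt world_size
instance (world_size : Int) (out : List (List (String × Int))) : Decidable (Spec_generate_parallelism_configs world_size out) := by unfold Spec_generate_parallelism_configs; infer_instance

-- ===== CLAIM (what is proved, stated in full; the proofs are below) =====
def Claim_equal_generate_parallelism_configs : Prop := ∀ (world_size : Int), Dom_generate_parallelism_configs world_size → Pre_generate_parallelism_configs world_size → Spec_generate_parallelism_configs world_size (generate_parallelism_configs world_size)

-- ===== LEMMAS AND PROOFS =====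

theorem pvPfInner_eq (fuel : Nat) : ∀ n d acc, pvPfInnerA fuel n d acc = pvPfInnerB fuel n d acc := by
  induction fuel with
  | zero => intro n d acc; rfl
  | succ f ih => intro n d acc; simp only [pvPfInnerA, pvPfInnerB, ih]

theorem pvPfOuter_eq (fuel : Nat) : ∀ n d acc, pvPfOuterA fuel n d acc = pvPfOuterB fuel n d acc := by
  induction fuel with
  | zero => intro n d acc; rfl
  | succ f ih => intro n d acc; simp only [pvPfOuterA, pvPfOuterB, ih, pvPfInner_eq]

theorem pf_AB_eq (n : Int) : prime_factorize_A n = prime_factorize_B n := pvPfOuter_eq _ n 2 []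

def pvToL (t : Int × Int × Int) : List Int := [t.1, t.2.1, t.2.2]

def pvMult (a t : Int × Int × Int) : Int × Int × Int := (a.1 * t.1, a.2.1 * t.2.1, a.2.2 * t.2.2)

theorem pvApplyOut (p x y z a b c : Int) :
    (List.range 3).foldl
      (fun o j => if ([a, b, c].getD j 0) ≠ 0 then o.set j (o.getD j 0 * p ^ (([a, b, c].getD j 0)).toNat) else o)
      [x, y, z]
      = [x * p ^ a.toNat, y * p ^ b.toNat, z * p ^ c.toNat] := by
  simp only [show List.range 3 = [0, 1, 2] from rfl, List.foldl_cons, List.foldl_nil, List.getD]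
  split_ifs <;> simp_all

theorem pvMain (ps : List (Int × Int)) : ∀ x y z : Int,
    pvDfsA 3 ps [x, y, z]
      = (pvProductB (ps.map fun pc => pvTriplesB pc.1 pc.2)).map
          (fun combo => pvToL (combo.foldl pvMult (x, y, z))) := by
  induction ps with
  | nil => intro x y z; simp [pvDfsA, pvProductB, pvToL]
  | cons pc rest ih =>
    intro x y z
    obtain ⟨p, c⟩ := pc
    rw [pvDfsA]
    show pvCompRecA 3 p rest (2 + 1 - 1) c [] [x, y, z] = _
    rw [pvCompRecA]
    simp only [List.map_cons, pvProductB, pvTriplesB, List.map_flatMap, List.flatMap_assoc,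
      List.flatMap_map, List.map_map]
    apply List.flatMap_congr
    intro c0 hc0
    rw [pvCompRecA]
    apply List.flatMap_congr
    intro c1 hc1
    rw [pvCompRecA]
    simp only [List.nil_append, List.cons_append]
    rw [pvApplyOut, ih]
    simp only [pvTriplesB, Function.comp_def, List.foldl_cons, pvMult]

-- ===== VERDICT (by name: the statement is the Claim_ definition above) =====
theorem generate_parallelism_configs_spec : Claim_equal_generate_parallelism_configs := by
  intro ws _ _
  show _ = _
  unfold generate_parallelism_configs generate_parallelism_configs_alt lists_from_primes_gen_A
  rw [pf_AB_eq]
  simp only [List.length_cons, List.length_nil]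
  norm_num
  rw [show ((3:Int).toNat) = 3 from rfl, show (List.replicate 3 (1:Int)) = [1,1,1] from rfl,
      pvMain, List.map_map]
  rfl
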